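-- pv_equiv track=rewrite | github.com/KwangsukYu/TIL | algorithm/SWEA/5203_베이비진 게임.py | is_triplet
-- ===== SOURCE A (Python) =====
-- def is_triplet(lst):
--
--     # 셋으로 중복을 제거한 뒤(동일 숫자 계산 방지 1, 2, 2, 3) sorted함수로 정렬, 카운팅용 변수 생성
--     new_lst = sorted(set(lst))
--     max_cnt = 0
--     cnt = 0
--
--     # 정렬 된 리스트만큼 순회를 하며서 i번과 i+1번 인덱스의 차가 -1이면 cnt 추가
--     # cnt가 max_cnt보다 크면 갱신, -1이 아니면 cnt를 0으로 초기화
--     for i in range(len(new_lst)-1):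
--         if new_lst[i] - new_lst[i+1] == -1:
--             cnt += 1
--
--             if cnt > max_cnt:
--                 max_cnt = cnt
--         else:
--             cnt = 0
--
--     # max_cnt 가 2 이상일 경우 True리턴
--     # max_cnt == 2로 하면 1 2 4 뒤에 3이 들어왔을때 max_cnt는 3이 되버림
--     if max_cnt >= 2:
--         return True
--     else:
--         return False
-- ===== SOURCE B (Python) =====
-- def is_triplet(lst):
--     s = set(lst)
--     return any(v + 1 in s and v + 2 in s for v in s)
-- ===== Notes on version B (the rewrite author's own statement) =====
-- stated objective: faster
-- what changed: replaces the sort + running-counter scan over adjacent differences by a direct set test for some v with v+1 and v+2 also present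
import Mathlib
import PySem

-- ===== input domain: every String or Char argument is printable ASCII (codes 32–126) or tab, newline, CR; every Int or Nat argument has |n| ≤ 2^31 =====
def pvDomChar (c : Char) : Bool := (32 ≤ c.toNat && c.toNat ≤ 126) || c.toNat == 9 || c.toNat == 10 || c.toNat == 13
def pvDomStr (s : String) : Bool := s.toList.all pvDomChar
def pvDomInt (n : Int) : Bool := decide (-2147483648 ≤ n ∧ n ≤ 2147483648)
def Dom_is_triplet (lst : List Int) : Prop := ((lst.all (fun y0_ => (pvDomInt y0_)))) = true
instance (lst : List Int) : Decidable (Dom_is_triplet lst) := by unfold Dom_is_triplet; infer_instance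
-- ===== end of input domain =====

-- B replaces A's sort + adjacent-difference counter scan by a direct set test
-- for a value v with v+1 and v+2 also present (objective: simpler).

-- ===== PORT A =====
-- the for-loop over i in range(len(new_lst)-1), comparing new_lst[i] and
-- new_lst[i+1], carrying (cnt, max_cnt); transcribed as the obvious structural
-- recursion over adjacent pairs with the same state
def pvALoop : List Int → Int → Int → Int
  | x :: y :: rest, cnt, max_cnt =>
    if x - y = -1 then
      pvALoop (y :: rest) (cnt + 1) (if cnt + 1 > max_cnt then cnt + 1 else max_cnt)
    else
      pvALoop (y :: rest) 0 max_cnt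
  | _, _, max_cnt => max_cnt

def is_triplet (lst : List Int) : Bool :=
  let new_lst := PySem.List.sorted (PySem.Set.ofList lst) (fun x => x) false
  if 2 ≤ pvALoop new_lst 0 0 then true else false

-- ===== PORT B =====
-- s = set(lst); any(v + 1 in s and v + 2 in s for v in s)
-- (any over a set: the result is order-independent, so List.any over the Set is exact)
def is_triplet_alt (lst : List Int) : Bool :=
  let s := PySem.Set.ofList lst
  s.any (fun v => PySem.Set.contains s (v + 1) && PySem.Set.contains s (v + 2))

-- ===== PRECONDITION & SPEC =====
def Spec_is_triplet (lst : List Int) (out : Bool) : Prop := out = is_triplet_alt lst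
instance (lst : List Int) (out : Bool) : Decidable (Spec_is_triplet lst out) := by unfold Spec_is_triplet; infer_instance

-- ===== CLAIM (what is proved, stated in full; the proofs are below) =====
def Claim_equal_is_triplet : Prop := ∀ (lst : List Int), Dom_is_triplet lst → Spec_is_triplet lst (is_triplet lst)

-- ===== LEMMAS AND PROOFS =====

-- an adjacent run x, x+1, x+2 somewhere in the list
def pvHasT : List Int → Bool
  | x :: y :: z :: rest => (decide (x + 1 = y) && decide (y + 1 = z)) || pvHasT (y :: z :: rest)
  | _ => false

def pvPairHead : List Int → Bool
  | x :: y :: _ => decide (x + 1 = y)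
  | _ => false

theorem pvALoop_iff (l : List Int) : ∀ cnt max_cnt : Int, 0 ≤ cnt → 0 ≤ max_cnt →
    (2 ≤ pvALoop l cnt max_cnt ↔
      2 ≤ max_cnt ∨ pvHasT l = true ∨ (1 ≤ cnt ∧ pvPairHead l = true)) := by
  induction l with
  | nil => intro cnt max_cnt _ _; simp [pvALoop, pvHasT, pvPairHead]
  | cons x t ih =>
    intro cnt max_cnt hc hm
    match t with
    | [] => simp [pvALoop, pvHasT, pvPairHead]
    | y :: rest =>
      by_cases hxy : x - y = -1
      · have hrec : pvALoop (x :: y :: rest) cnt max_cnt =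
            pvALoop (y :: rest) (cnt + 1) (if cnt + 1 > max_cnt then cnt + 1 else max_cnt) := by
          simp [pvALoop, hxy]
        rw [hrec, ih (cnt + 1) _ (by omega) (by split <;> omega)]
        have hxy' : x + 1 = y := by omega
        have hite : (2 ≤ (if cnt + 1 > max_cnt then cnt + 1 else max_cnt)) ↔
            (2 ≤ max_cnt ∨ 1 ≤ cnt) := by split <;> omega
        rw [hite]
        have hc1 : (1 : Int) ≤ cnt + 1 := by omega
        match rest with
        | [] => simp [pvHasT, pvPairHead, hxy']
        | z :: rest' =>
          simp only [pvHasT, pvPairHead, hxy', decide_true, Bool.true_and, Bool.or_eq_true,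
            decide_eq_true_eq, hc1, true_and]
          tauto
      · have hrec : pvALoop (x :: y :: rest) cnt max_cnt = pvALoop (y :: rest) 0 max_cnt := by
          simp [pvALoop, hxy]
        rw [hrec, ih 0 max_cnt le_rfl hm]
        have hxy' : ¬ (x + 1 = y) := by omega
        match rest with
        | [] => simp [pvHasT, pvPairHead, hxy']
        | z :: rest' => simp [pvHasT, pvPairHead, hxy']

theorem pvHasT_tail (x : Int) (t : List Int) (h : pvHasT t = true) : pvHasT (x :: t) = true := by
  match t with
  | [] => simp [pvHasT] at h
  | [y] => simp [pvHasT] at h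
  | y :: z :: r => simp only [pvHasT, Bool.or_eq_true]; right; exact h

theorem pvHasT_mem (l : List Int) (h : pvHasT l = true) :
    ∃ v, v ∈ l ∧ (v + 1) ∈ l ∧ (v + 2) ∈ l := by
  induction l with
  | nil => simp [pvHasT] at h
  | cons x t ih =>
    match t with
    | [] => simp [pvHasT] at h
    | [y] => simp [pvHasT] at h
    | y :: z :: r =>
      simp only [pvHasT, Bool.or_eq_true, Bool.and_eq_true, decide_eq_true_eq] at h
      rcases h with ⟨h1, h2⟩ | h
      · exact ⟨x, by simp, by simp [h1], by simp; right; left; omega⟩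
      · rcases ih h with ⟨v, hv, hv1, hv2⟩
        exact ⟨v, by simp [hv], by simp [hv1], by simp [hv2]⟩

theorem pvMem_hasT (l : List Int) (hp : l.Pairwise (· < ·)) (v : Int)
    (hv : v ∈ l) (hv1 : (v + 1) ∈ l) (hv2 : (v + 2) ∈ l) : pvHasT l = true := by
  induction l with
  | nil => simp at hv
  | cons x t ih =>
    rcases List.pairwise_cons.mp hp with ⟨hx, ht⟩
    rcases List.mem_cons.mp hv with rfl | hvt
    · -- v = x : the three values must be the first three elements
      have h1t : (v + 1) ∈ t := by
        rcases List.mem_cons.mp hv1 with h | h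
        · omega
        · exact h
      have h2t : (v + 2) ∈ t := by
        rcases List.mem_cons.mp hv2 with h | h
        · omega
        · exact h
      match t with
      | [] => simp at h1t
      | y :: r =>
        rcases List.pairwise_cons.mp ht with ⟨hy, hr⟩
        have hxy : v < y := hx y (by simp)
        have hy1 : y = v + 1 := by
          rcases List.mem_cons.mp h1t with h | h
          · omega
          · have := hy _ h; omega
        subst hy1
        have h2r : (v + 2) ∈ r := by
          rcases List.mem_cons.mp h2t with h | h
          · omega
          · exact h
        match r with
        | [] => simp at h2r
        | z :: r' =>
          rcases List.pairwise_cons.mp hr with ⟨hz, _⟩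
          have hz2 : z = v + 2 := by
            rcases List.mem_cons.mp h2r with h | h
            · omega
            · have ha : v + 1 < z := hy z (by simp)
              have hb : z < v + 2 := hz _ h
              omega
          subst hz2
          simp only [pvHasT, Bool.or_eq_true, Bool.and_eq_true, decide_eq_true_eq]
          left
          constructor
          · trivial
          · ring
    · -- all three are in the tail
      have h1t : (v + 1) ∈ t := by
        rcases List.mem_cons.mp hv1 with h | h
        · have := hx v hvt; omega
        · exact h
      have h2t : (v + 2) ∈ t := by
        rcases List.mem_cons.mp hv2 with h | h
        · have := hx v hvt; omega
        · exact h
      exact pvHasT_tail x t (ih ht hvt h1t h2t)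

theorem is_triplet_eq (lst : List Int) : is_triplet lst = is_triplet_alt lst := by
  rw [Bool.eq_iff_iff]
  unfold is_triplet is_triplet_alt
  simp only [List.any_eq_true, Bool.and_eq_true, PySem.Set.contains_iff]
  constructor
  · intro h
    have h2 : 2 ≤ pvALoop (PySem.List.sorted (PySem.Set.ofList lst) (fun x => x) false) 0 0 := by
      by_contra hn; simp [hn] at h
    rw [pvALoop_iff _ 0 0 le_rfl le_rfl] at h2
    rcases h2 with h2 | h2 | h2
    · omega
    · rcases pvHasT_mem _ h2 with ⟨v, hv, hv1, hv2⟩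
      rw [PySem.List.mem_sorted] at hv hv1 hv2
      exact ⟨v, hv, hv1, hv2⟩
    · omega
  · rintro ⟨v, hv, hv1, hv2⟩
    have hT : pvHasT (PySem.List.sorted (PySem.Set.ofList lst) (fun x => x) false) = true :=
      pvMem_hasT _ (PySem.List.sorted_ofList_pairwise_lt lst) v
        (by rw [PySem.List.mem_sorted]; exact hv)
        (by rw [PySem.List.mem_sorted]; exact hv1)
        (by rw [PySem.List.mem_sorted]; exact hv2)
    have : 2 ≤ pvALoop (PySem.List.sorted (PySem.Set.ofList lst) (fun x => x) false) 0 0 := by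
      rw [pvALoop_iff _ 0 0 le_rfl le_rfl]; tauto
    simp [this]

-- ===== VERDICT (by name: the statement is the Claim_ definition above) =====
theorem is_triplet_spec : Claim_equal_is_triplet := by
  intro lst _
  unfold Spec_is_triplet
  exact is_triplet_eq lst
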